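-- pv_equiv track=rewrite | github.com/Willzy14/Automated-DJ-Mixes | Source/automated_dj_mixes/als_generator.py | _find_main_track_envelopes_line
-- ===== SOURCE A (Python) =====
-- def _find_main_track_envelopes_line(lines: list[str]) -> int | None:
--     """Find the <Envelopes> line inside <MainTrack><AutomationEnvelopes>."""
--     in_main = False
--     for i, line in enumerate(lines):
--         if "<MainTrack" in line:
--             in_main = True
--         if in_main and "<AutomationEnvelopes>" in line:
--             for j in range(i, min(i + 5, len(lines))):
--                 if "<Envelopes" in lines[j]:
--                     return j
--             return None
--     return None
-- ===== SOURCE B (Python) =====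
-- def _index_containing(lines, sub, start):
--     for i, line in enumerate(lines[start:], start):
--         if sub in line:
--             return i
--     return None
--
--
-- def _find_main_track_envelopes_line(lines: list[str]) -> int | None:
--     """Find the <Envelopes> line inside <MainTrack><AutomationEnvelopes>."""
--     m = _index_containing(lines, "<MainTrack", 0)
--     if m is None:
--         return None
--     e = _index_containing(lines, "<AutomationEnvelopes>", m)
--     if e is None:
--         return None
--     return _index_containing(lines[:e + 5], "<Envelopes", e)
-- ===== Notes on version B (the rewrite author's own statement) =====
-- stated objective: simpler
-- what changed: Replaced the single loop with a sticky in_main flag and an interleaved window scan by three sequential phases using one shared index-of-first-line-containing helper: find '<MainTrack', then '<AutomationEnvelopes>' from there, then '<Envelopes' in the 5-line window.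
import Mathlib
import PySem

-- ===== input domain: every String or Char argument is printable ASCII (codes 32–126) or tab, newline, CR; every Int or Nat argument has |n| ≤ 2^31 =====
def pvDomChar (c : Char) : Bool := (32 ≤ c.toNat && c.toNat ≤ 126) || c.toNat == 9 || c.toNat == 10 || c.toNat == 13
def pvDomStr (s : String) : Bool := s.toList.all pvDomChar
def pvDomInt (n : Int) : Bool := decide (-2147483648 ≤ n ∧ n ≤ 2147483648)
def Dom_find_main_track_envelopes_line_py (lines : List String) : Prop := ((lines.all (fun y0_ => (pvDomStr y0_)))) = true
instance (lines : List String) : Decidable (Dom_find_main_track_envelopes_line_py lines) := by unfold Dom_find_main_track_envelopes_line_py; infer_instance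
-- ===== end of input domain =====

-- B replaces A's single sticky-flag loop with three sequential first-index searches (simpler decomposition); return values are identical.

-- ===== PORT A =====
-- inner 'for j in range(i, min(i+5, len(lines)))' window scan
def aWindow (lines : List String) : List Int → Option Int
  | [] => none
  | j :: rest =>
    if PySem.Str.isIn "<Envelopes" (PySem.List.pyGetD lines j "") then some j
    else aWindow lines rest

-- main 'for i, line in enumerate(lines)' loop carrying the sticky in_main flag
def aLoop (lines : List String) : List String → Int → Bool → Option Int
  | [], _, _ => none
  | line :: rs, i, in_main =>
    let im := if PySem.Str.isIn "<MainTrack" line then true else in_main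
    if im && PySem.Str.isIn "<AutomationEnvelopes>" line then
      aWindow lines (PySem.List.pyRange i (min (i + 5) (lines.length : Int)) 1)
    else aLoop lines rs (i + 1) im

def find_main_track_envelopes_line_py (lines : List String) : Option Int :=
  aLoop lines lines 0 false

-- ===== PORT B =====
-- helper _index_containing: first index ≥ start whose line contains sub ('for i, line in enumerate(lines[start:], start)')
def idxGo (sub : String) : List String → Int → Option Int
  | [], _ => none
  | l :: ls, i => if PySem.Str.isIn sub l then some i else idxGo sub ls (i + 1)

def indexContaining (lines : List String) (sub : String) (start : Int) : Option Int :=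
  idxGo sub (PySem.List.slice lines (some start) none) start

def find_main_track_envelopes_line_py_alt (lines : List String) : Option Int :=
  match indexContaining lines "<MainTrack" 0 with
  | none => none
  | some m =>
    match indexContaining lines "<AutomationEnvelopes>" m with
    | none => none
    | some e => indexContaining (PySem.List.slice lines none (some (e + 5))) "<Envelopes" e

-- ===== PRECONDITION & SPEC =====
def Spec_find_main_track_envelopes_line_py (lines : List String) (out : Option Int) : Prop := out = find_main_track_envelopes_line_py_alt lines
instance (lines : List String) (out : Option Int) : Decidable (Spec_find_main_track_envelopes_line_py lines out) := by unfold Spec_find_main_track_envelopes_line_py; infer_instance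

-- ===== CLAIM (what is proved, stated in full; the proofs are below) =====
def Claim_equal_find_main_track_envelopes_line_py : Prop := ∀ (lines : List String), Dom_find_main_track_envelopes_line_py lines → Spec_find_main_track_envelopes_line_py lines (find_main_track_envelopes_line_py lines)

-- ===== LEMMAS AND PROOFS =====

theorem idxGo_le (sub : String) : ∀ (ls : List String) (i m : Int), idxGo sub ls i = some m → i ≤ m := by
  intro ls
  induction ls with
  | nil => intro i m h; simp [idxGo] at h
  | cons l t ih =>
    intro i m h
    simp only [idxGo] at h
    split at h
    · exact le_of_eq (Option.some.inj h)
    · have := ih (i + 1) m h; omega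

-- A's loop once in_main is true = first '<AutomationEnvelopes>' line then the window
theorem lemT (lines : List String) : ∀ (rs : List String) (i : Int),
    aLoop lines rs i true =
      match idxGo "<AutomationEnvelopes>" rs i with
      | none => none
      | some e => aWindow lines (PySem.List.pyRange e (min (e + 5) (lines.length : Int)) 1) := by
  intro rs
  induction rs with
  | nil => intro i; simp [aLoop, idxGo]
  | cons l t ih =>
    intro i
    simp only [aLoop, idxGo]
    have him : (if PySem.Str.isIn "<MainTrack" l then true else true) = true := by
      cases PySem.Str.isIn "<MainTrack" l <;> rfl
    rw [him, Bool.true_and]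
    cases hc : PySem.Str.isIn "<AutomationEnvelopes>" l with
    | true => rw [if_pos rfl, if_pos rfl]
    | false => rw [if_neg (by simp), if_neg (by simp), ih]

-- A's loop with in_main false = first '<MainTrack' line, then rerun from there with in_main true
theorem lemF (lines : List String) : ∀ (rs : List String) (i : Int),
    aLoop lines rs i false =
      match idxGo "<MainTrack" rs i with
      | none => none
      | some m => aLoop lines (rs.drop (m - i).toNat) m true := by
  intro rs
  induction rs with
  | nil => intro i; simp [aLoop, idxGo]
  | cons l t ih =>
    intro i
    simp only [aLoop, idxGo]
    cases hm : PySem.Str.isIn "<MainTrack" l with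
    | true =>
      rw [if_pos rfl, if_pos rfl]
      dsimp only
      rw [Int.sub_self, Int.toNat_zero, List.drop_zero]
      simp only [aLoop, hm]
      rfl
    | false =>
      rw [if_neg (by simp), if_neg (by simp), if_neg (by simp), ih]
      cases hm2 : idxGo "<MainTrack" t (i + 1) with
      | none => rfl
      | some m =>
        have hle := idxGo_le _ _ _ _ hm2
        dsimp only
        rw [show (m - i).toNat = (m - (i + 1)).toNat + 1 by omega, List.drop_succ_cons]

-- the window scan = B's search over (lines.take b).drop a
theorem lemW (lines : List String) : ∀ (n : Nat) (a b : Nat), b ≤ lines.length → b - a = n →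
    aWindow lines (PySem.List.pyRange (a : Int) (b : Int) 1) =
      idxGo "<Envelopes" ((lines.take b).drop a) (a : Int) := by
  intro n
  induction n with
  | zero =>
    intro a b hb h
    rw [PySem.List.pyRange_one_eq_nil (by omega)]
    rw [List.drop_eq_nil_of_le (by simp; omega)]
    rfl
  | succ k ih =>
    intro a b hb h
    have hab : a < b := by omega
    have ha : a < lines.length := by omega
    rw [PySem.List.pyRange_one_cons (by exact_mod_cast hab)]
    have hlen : a < (lines.take b).length := by simp; omega
    rw [List.drop_eq_getElem_cons hlen]
    simp only [aWindow, idxGo, List.getElem_take]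
    rw [PySem.List.pyGetD_natCast, List.getD_eq_getElem lines "" ha]
    cases hc : PySem.Str.isIn "<Envelopes" lines[a] with
    | true => rw [if_pos rfl, if_pos rfl]
    | false =>
      rw [if_neg (by simp), if_neg (by simp)]
      rw [show ((a : Int) + 1) = ((a + 1 : Nat) : Int) by push_cast; ring]
      rw [ih (a + 1) b hb (by omega)]

-- ===== VERDICT (by name: the statement is the Claim_ definition above) =====
theorem find_main_track_envelopes_line_py_spec : Claim_equal_find_main_track_envelopes_line_py := by
  intro lines _
  unfold Spec_find_main_track_envelopes_line_py find_main_track_envelopes_line_py find_main_track_envelopes_line_py_alt indexContaining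
  rw [lemF]
  rw [show PySem.List.slice lines (some 0) none = lines from by
    simp [PySem.List.slice_from (xs := lines) (a := 0) le_rfl]]
  cases hm : idxGo "<MainTrack" lines 0 with
  | none => rfl
  | some m =>
    have hm0 : 0 ≤ m := idxGo_le _ _ _ _ hm
    dsimp only
    rw [Int.sub_zero, lemT]
    rw [PySem.List.slice_from lines hm0]
    cases he : idxGo "<AutomationEnvelopes>" (lines.drop m.toNat) m with
    | none => rfl
    | some e =>
      have he0 : 0 ≤ e := le_trans hm0 (idxGo_le _ _ _ _ he)
      dsimp only
      rw [PySem.List.slice_to lines (show (0:Int) ≤ e + 5 by omega)]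
      rw [PySem.List.slice_from _ he0]
      have hb : min ((e + 5).toNat) lines.length ≤ lines.length := by omega
      have key := lemW lines (min ((e + 5).toNat) lines.length - e.toNat) e.toNat
        (min ((e + 5).toNat) lines.length) hb rfl
      rw [show ((e.toNat : Nat) : Int) = e from by omega] at key
      rw [show ((min ((e + 5).toNat) lines.length : Nat) : Int) = min (e + 5) (lines.length : Int) from by
        push_cast; omega] at key
      rw [key]
      rcases Nat.le_total ((e + 5).toNat) lines.length with hle | hle
      · rw [Nat.min_eq_left hle]
      · rw [Nat.min_eq_right hle, List.take_length, List.take_of_length_le hle]
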